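-- pv_equiv track=rewrite | github.com/cry999/AtCoder | beginner-contest/087/C.py | candies
-- ===== SOURCE A (Python) =====
-- def candies(N: int, A: list) -> int:
--     S = [[0] * (N + 1), [0] * (N + 1)]
--     for n in range(N):
--         S[0][n + 1] = S[0][n] + A[0][n]
--         S[1][N - (n + 1)] = S[1][N - n] + A[1][N - (n + 1)]
--
--     max_candies = 0
--     for n in range(N):
--         max_candies = max(max_candies, S[0][n+1] + S[1][n])
--
--     return max_candies
-- ===== SOURCE B (Python) =====
-- def candies(N: int, A: list) -> int:
--     if N <= 0:
--         return 0
--     top = A[0][0]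
--     dp = top + A[1][0]
--     for n in range(1, N):
--         top += A[0][n]
--         dp = max(top, dp) + A[1][n]
--     return max(0, dp)
-- ===== Notes on version B (the rewrite author's own statement) =====
-- stated objective: simpler
-- what changed: Replaces A's prefix/suffix-sum tables and explicit enumeration of split points by the classic per-cell grid dynamic programming: one state dp = max(top, dp) + A[1][n] carried along the columns, with no suffix sums of the bottom row and no second pass.
import Mathlib
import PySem

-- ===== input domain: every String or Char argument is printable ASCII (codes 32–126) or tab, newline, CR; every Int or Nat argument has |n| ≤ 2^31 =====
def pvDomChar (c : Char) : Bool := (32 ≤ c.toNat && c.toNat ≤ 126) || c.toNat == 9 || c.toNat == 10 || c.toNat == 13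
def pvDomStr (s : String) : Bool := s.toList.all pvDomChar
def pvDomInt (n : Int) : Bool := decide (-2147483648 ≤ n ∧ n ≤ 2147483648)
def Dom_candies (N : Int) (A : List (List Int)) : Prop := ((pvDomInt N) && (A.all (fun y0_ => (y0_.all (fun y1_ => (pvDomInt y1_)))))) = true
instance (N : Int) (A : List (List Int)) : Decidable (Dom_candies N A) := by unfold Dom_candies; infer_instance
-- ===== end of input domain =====

-- B replaces A's prefix/suffix-sum tables and split-point enumeration by a per-cell grid DP (dp = max(top, dp) + A[1][n]), one pass, O(1) extra space; same speed class.

-- ===== PORT A =====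
def candies (N : Int) (A : List (List Int)) : Int :=
  let s0 : List Int := List.replicate (N + 1).toNat 0
  let s1 : List Int := List.replicate (N + 1).toNat 0
  let S := (PySem.List.pyRange 0 N 1).foldl
    (fun (S : List Int × List Int) n =>
      (PySem.List.pySetD S.1 (n + 1)
         (PySem.List.pyGetD S.1 n 0 + PySem.List.pyGetD (PySem.List.pyGetD A 0 []) n 0),
       PySem.List.pySetD S.2 (N - (n + 1))
         (PySem.List.pyGetD S.2 (N - n) 0 + PySem.List.pyGetD (PySem.List.pyGetD A 1 []) (N - (n + 1)) 0)))
    (s0, s1)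
  (PySem.List.pyRange 0 N 1).foldl
    (fun mx n => max mx (PySem.List.pyGetD S.1 (n + 1) 0 + PySem.List.pyGetD S.2 n 0)) 0

-- ===== PORT B =====
def candies_alt (N : Int) (A : List (List Int)) : Int :=
  if N ≤ 0 then 0
  else
    let top0 := PySem.List.pyGetD (PySem.List.pyGetD A 0 []) 0 0
    let dp0 := top0 + PySem.List.pyGetD (PySem.List.pyGetD A 1 []) 0 0
    let st := (PySem.List.pyRange 1 N 1).foldl
      (fun (s : Int × Int) n =>
        let top := s.1 + PySem.List.pyGetD (PySem.List.pyGetD A 0 []) n 0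
        (top, max top s.2 + PySem.List.pyGetD (PySem.List.pyGetD A 1 []) n 0))
      (top0, dp0)
    max 0 st.2

-- ===== PRECONDITION & SPEC =====
-- Pre_: exactly the inputs where Python A returns (for N > 0 it indexes A[0][0..N-1] and A[1][0..N-1], raising if A has
-- fewer than two rows or a row is shorter than N; for N ≤ 0 it touches nothing and returns 0).
def Pre_candies (N : Int) (A : List (List Int)) : Prop :=
  0 < N → (2 ≤ A.length ∧ N ≤ ((A.getD 0 []).length : Int) ∧ N ≤ ((A.getD 1 []).length : Int))
instance (N : Int) (A : List (List Int)) : Decidable (Pre_candies N A) := by unfold Pre_candies; infer_instance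
def pvWitness_candies : Int × List (List Int) := (2, [[3, 1], [1, 5]])
def Spec_candies (N : Int) (A : List (List Int)) (out : Int) : Prop := out = candies_alt N A
instance (N : Int) (A : List (List Int)) (out : Int) : Decidable (Spec_candies N A out) := by unfold Spec_candies; infer_instance

-- ===== CLAIM (what is proved, stated in full; the proofs are below) =====
def Claim_equal_candies : Prop := ∀ (N : Int) (A : List (List Int)), Dom_candies N A → Pre_candies N A → Spec_candies N A (candies N A)

-- ===== LEMMAS AND PROOFS =====

-- prefix sum of the top row
def pvP0 (r : List Int) (k : Nat) : Int := (r.take k).sum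
-- sum of the bottom row from column k to column m-1
def pvQ (r : List Int) (m k : Nat) : Int := ((r.take m).drop k).sum
-- running maximum over the first k columns (A's second loop)
def pvM (r0 r1 : List Int) (m k : Nat) : Int :=
  (List.range k).foldl (fun b n => max b (pvP0 r0 (n + 1) + pvQ r1 m n)) 0
-- B's DP value after processing columns 0 .. k
def pvDP (r0 r1 : List Int) : Nat → Int
  | 0 => pvP0 r0 1 + r1.getD 0 0
  | k + 1 => max (pvP0 r0 (k + 1 + 1)) (pvDP r0 r1 k) + r1.getD (k + 1) 0

theorem pvP0_succ (r : List Int) (k : Nat) (h : k < r.length) :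
    pvP0 r (k + 1) = pvP0 r k + r.getD k 0 := by
  simp [pvP0, List.sum_take_succ r k h, List.getD, List.getElem?_eq_getElem h]

theorem pvQ_succ (r : List Int) (m j : Nat) (hj : j < m) (hm : m ≤ r.length) :
    pvQ r m j = r.getD j 0 + pvQ r m (j + 1) := by
  have hlen : j < (r.take m).length := by simp; omega
  rw [pvQ, pvQ, List.drop_eq_getElem_cons hlen]
  have : (r.take m)[j] = r[j]'(by omega) := List.getElem_take
  simp [this, List.getD, List.getElem?_eq_getElem (show j < r.length by omega)]

theorem pvQ_self (r : List Int) (m : Nat) : pvQ r m m = 0 := by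
  simp [pvQ]

theorem pvM_succ (r0 r1 : List Int) (m k : Nat) :
    pvM r0 r1 m (k + 1) = max (pvM r0 r1 m k) (pvP0 r0 (k + 1) + pvQ r1 m k) := by
  simp [pvM, List.range_succ]

-- the state of A's fill loop after k iterations
def pvS0 (r0 : List Int) (m k : Nat) : List Int :=
  (List.range (m + 1)).map (fun j => if j ≤ k then pvP0 r0 j else 0)
def pvS1 (r1 : List Int) (m k : Nat) : List Int :=
  (List.range (m + 1)).map (fun j => if m - k ≤ j then pvQ r1 m j else 0)

theorem pvS0_getD (r0 : List Int) (m k j : Nat) (hj : j < m + 1) :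
    (pvS0 r0 m k).getD j 0 = if j ≤ k then pvP0 r0 j else 0 := by
  simp [pvS0, List.getD, List.getElem?_map, List.getElem?_range hj]

theorem pvS1_getD (r1 : List Int) (m k j : Nat) (hj : j < m + 1) :
    (pvS1 r1 m k).getD j 0 = if m - k ≤ j then pvQ r1 m j else 0 := by
  simp [pvS1, List.getD, List.getElem?_map, List.getElem?_range hj]

-- one Nat-indexed step of A's fill loop
def pvStepA (r0 r1 : List Int) (m : Nat) (S : List Int × List Int) (k : Nat) : List Int × List Int :=
  (S.1.set (k + 1) (S.1.getD k 0 + r0.getD k 0),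
   S.2.set (m - (k + 1)) (S.2.getD (m - k) 0 + r1.getD (m - (k + 1)) 0))

theorem pvFillA (r0 r1 : List Int) (m : Nat) (h0 : m ≤ r0.length) (h1 : m ≤ r1.length)
    (k : Nat) (hk : k ≤ m) :
    (List.range k).foldl (pvStepA r0 r1 m) (List.replicate (m + 1) 0, List.replicate (m + 1) 0)
      = (pvS0 r0 m k, pvS1 r1 m k) := by
  induction k with
  | zero =>
    simp only [List.range_zero, List.foldl_nil, Prod.mk.injEq]
    refine ⟨?_, ?_⟩
    · apply List.ext_getElem
      · simp [pvS0]
      · intro j h1' h2'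
        have hj : j < m + 1 := by simpa using h1'
        simp only [pvS0, List.getElem_map, List.getElem_range, List.getElem_replicate]
        rcases Nat.eq_zero_or_pos j with rfl | h
        · simp [pvP0]
        · rw [if_neg (by omega)]
    · apply List.ext_getElem
      · simp [pvS1]
      · intro j h1' h2'
        have hj : j < m + 1 := by simpa using h1'
        simp only [pvS1, List.getElem_map, List.getElem_range, List.getElem_replicate]
        by_cases hmj : m - 0 ≤ j
        · rw [if_pos hmj]
          have hjm : j = m := by omega
          rw [hjm, pvQ_self r1 m]
        · rw [if_neg hmj]
  | succ k ih =>
    rw [List.range_succ, List.foldl_append, ih (by omega), List.foldl_cons, List.foldl_nil]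
    have hk' : k < m := by omega
    unfold pvStepA
    simp only [Prod.mk.injEq]
    refine ⟨?_, ?_⟩
    · -- top row component
      rw [pvS0_getD r0 m k k (by omega), if_pos (le_refl k)]
      apply List.ext_getElem
      · simp [pvS0]
      · intro j hj _
        have hj' : j < m + 1 := by simp [pvS0] at hj; omega
        rcases eq_or_ne j (k + 1) with rfl | hne
        · rw [List.getElem_set_self (by simp [pvS0] at hj ⊢; try omega)]
          simp only [pvS0, List.getElem_map, List.getElem_range]
          rw [if_pos (le_refl (k + 1)), pvP0_succ r0 k (by omega)]
        · rw [List.getElem_set_ne (by omega)]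
          simp only [pvS0, List.getElem_map, List.getElem_range]
          by_cases hle : j ≤ k
          · rw [if_pos hle, if_pos (by omega)]
          · rw [if_neg hle, if_neg (by omega)]
    · -- bottom row component
      rw [pvS1_getD r1 m k (m - k) (by omega), if_pos (le_refl (m - k))]
      apply List.ext_getElem
      · simp [pvS1]
      · intro j hj _
        have hj' : j < m + 1 := by simp [pvS1] at hj; omega
        rcases eq_or_ne j (m - (k + 1)) with rfl | hne
        · rw [List.getElem_set_self (by simp [pvS1] at hj ⊢; try omega)]
          have hq : pvQ r1 m (m - (k + 1)) = r1.getD (m - (k + 1)) 0 + pvQ r1 m (m - k) := by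
            have := pvQ_succ r1 m (m - (k + 1)) (by omega) h1
            rwa [show m - (k + 1) + 1 = m - k by omega] at this
          simp only [pvS1, List.getElem_map, List.getElem_range]
          rw [if_pos (le_refl (m - (k + 1))), hq]
          ring
        · rw [List.getElem_set_ne (by omega)]
          simp only [pvS1, List.getElem_map, List.getElem_range]
          by_cases hle : m - k ≤ j
          · rw [if_pos hle, if_pos (by omega)]
          · rw [if_neg hle, if_neg (by omega)]

-- A's second loop reads exactly the prefix/suffix sums
theorem pvA_eq (r0 r1 : List Int) (m : Nat) :
    (List.range m).foldl
      (fun mx n => max mx ((pvS0 r0 m m).getD (n + 1) 0 + (pvS1 r1 m m).getD n 0)) 0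
      = pvM r0 r1 m m := by
  apply PySem.List.foldl_congr_mem
  intro acc n hn
  have hn' : n < m := List.mem_range.mp hn
  rw [pvS0_getD r0 m m (n + 1) (by omega), pvS1_getD r1 m m n (by omega)]
  simp only [if_pos (by omega : n + 1 ≤ m), if_pos (by omega : m - m ≤ n)]

-- B's loop over columns 1..k keeps (running top prefix sum, pvDP)
theorem pvB_inv (r0 r1 : List Int) (k : Nat) (hk : k < r0.length) :
    (List.range k).foldl
      (fun (s : Int × Int) j =>
        (s.1 + r0.getD (j + 1) 0,
         max (s.1 + r0.getD (j + 1) 0) s.2 + r1.getD (j + 1) 0))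
      (pvP0 r0 1, pvDP r0 r1 0)
      = (pvP0 r0 (k + 1), pvDP r0 r1 k) := by
  induction k with
  | zero => rfl
  | succ k ih =>
    rw [List.range_succ, List.foldl_append, ih (by omega), List.foldl_cons, List.foldl_nil]
    have e0 : pvP0 r0 (k + 1) + r0.getD (k + 1) 0 = pvP0 r0 (k + 1 + 1) :=
      (pvP0_succ r0 (k + 1) (by omega)).symm
    rw [e0]
    rfl

-- A's running maximum equals the clamped DP value shifted by the remaining bottom suffix
theorem pvMD (r0 r1 : List Int) (m : Nat) (h1 : m ≤ r1.length) (k : Nat) (hk : k < m) :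
    pvM r0 r1 m (k + 1) = max 0 (pvDP r0 r1 k + pvQ r1 m (k + 1)) := by
  induction k with
  | zero =>
    have hq := pvQ_succ r1 m 0 hk h1
    have h0 : pvM r0 r1 m 0 = 0 := rfl
    rw [pvM_succ, h0, pvDP]
    simp only [Nat.zero_add] at hq ⊢
    omega
  | succ k ih =>
    have hq := pvQ_succ r1 m (k + 1) hk h1
    rw [pvM_succ, ih (by omega), pvDP]
    omega

theorem le_or_lt_of_int (N : Int) : N ≤ 0 ∨ 0 < N := by omega

-- ===== VERDICT (by name: the statement is the Claim_ definition above) =====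
theorem candies_spec : Claim_equal_candies := by
  intro N A _hDom hPre
  unfold Spec_candies candies candies_alt
  rcases le_or_lt_of_int N with hN | hN
  · rw [if_pos hN, PySem.List.pyRange_one_eq_nil hN]
    simp
  · rw [if_neg (by omega)]
    obtain ⟨hA2, hL0, hL1⟩ := hPre hN
    set r0 : List Int := A.getD 0 [] with hr0
    set r1 : List Int := A.getD 1 [] with hr1
    have hrow0 : PySem.List.pyGetD A 0 [] = r0 := by
      rw [PySem.List.pyGetD_zero]
    have hrow1 : PySem.List.pyGetD A 1 [] = r1 := by
      rw [show (1 : Int) = ((1 : Nat) : Int) from rfl, PySem.List.pyGetD_natCast]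
    obtain ⟨m, hm⟩ : ∃ m : Nat, N = (m : Int) := ⟨N.toNat, by omega⟩
    subst hm
    have hm1 : 1 ≤ m := by omega
    have h0 : m ≤ r0.length := by exact_mod_cast hL0
    have h1 : m ≤ r1.length := by exact_mod_cast hL1
    rw [hrow0, hrow1]
    -- ===== A side =====
    have hrange : PySem.List.pyRange 0 (m : Int) 1 = List.map (fun k : Nat => (k : Int)) (List.range m) := by
      rw [PySem.List.pyRange_one]
      rw [show ((m : Int) - 0).toNat = m by omega]
      exact List.map_congr_left (fun k _ => by omega)
    rw [hrange]
    simp only [List.foldl_map]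
    have hrepl : ((m : Int) + 1).toNat = m + 1 := by omega
    rw [hrepl]
    have hfillA :
        (List.range m).foldl
          (fun (S : List Int × List Int) (k : Nat) =>
            (PySem.List.pySetD S.1 ((k : Int) + 1)
               (PySem.List.pyGetD S.1 (k : Int) 0 + PySem.List.pyGetD r0 (k : Int) 0),
             PySem.List.pySetD S.2 ((m : Int) - ((k : Int) + 1))
               (PySem.List.pyGetD S.2 ((m : Int) - (k : Int)) 0 +
                PySem.List.pyGetD r1 ((m : Int) - ((k : Int) + 1)) 0)))
          (List.replicate (m + 1) 0, List.replicate (m + 1) 0)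
          = (pvS0 r0 m m, pvS1 r1 m m) := by
      rw [← pvFillA r0 r1 m h0 h1 m le_rfl]
      apply PySem.List.foldl_congr_mem
      intro S k hk
      have hk' : k < m := List.mem_range.mp hk
      unfold pvStepA
      have c1 : (k : Int) + 1 = ((k + 1 : Nat) : Int) := by push_cast; ring
      have c2 : (m : Int) - ((k : Int) + 1) = ((m - (k + 1) : Nat) : Int) := by omega
      have c3 : (m : Int) - (k : Int) = ((m - k : Nat) : Int) := by omega
      rw [c2, c3, c1]
      simp only [PySem.List.pySetD_natCast, PySem.List.pyGetD_natCast]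
    rw [hfillA]
    have hmax :
        (List.range m).foldl
          (fun mx (k : Nat) =>
            max mx (PySem.List.pyGetD (pvS0 r0 m m) ((k : Int) + 1) 0 +
                    PySem.List.pyGetD (pvS1 r1 m m) (k : Int) 0)) 0
          = pvM r0 r1 m m := by
      rw [← pvA_eq r0 r1 m]
      apply PySem.List.foldl_congr_mem
      intro mx k _
      have c1 : (k : Int) + 1 = ((k + 1 : Nat) : Int) := by push_cast; ring
      rw [c1, PySem.List.pyGetD_natCast, PySem.List.pyGetD_natCast]
    rw [hmax]
    -- ===== B side =====
    have hrangeB : PySem.List.pyRange 1 (m : Int) 1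
        = List.map (fun k : Nat => ((k + 1 : Nat) : Int)) (List.range (m - 1)) := by
      rw [PySem.List.pyRange_one]
      rw [show ((m : Int) - 1).toNat = m - 1 by omega]
      exact List.map_congr_left (fun k _ => by omega)
    rw [hrangeB]
    simp only [List.foldl_map]
    have hBfold :
        (List.range (m - 1)).foldl
          (fun (s : Int × Int) (k : Nat) =>
            (s.1 + PySem.List.pyGetD r0 ((k + 1 : Nat) : Int) 0,
             max (s.1 + PySem.List.pyGetD r0 ((k + 1 : Nat) : Int) 0) s.2 +
               PySem.List.pyGetD r1 ((k + 1 : Nat) : Int) 0))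
          (PySem.List.pyGetD r0 0 0, PySem.List.pyGetD r0 0 0 + PySem.List.pyGetD r1 0 0)
          = (pvP0 r0 (m - 1 + 1), pvDP r0 r1 (m - 1)) := by
      rw [← pvB_inv r0 r1 (m - 1) (by omega)]
      have hinit1 : PySem.List.pyGetD r0 0 0 = pvP0 r0 1 := by
        rw [PySem.List.pyGetD_zero, show (1 : Nat) = 0 + 1 from rfl, pvP0_succ r0 0 (by omega)]
        simp [pvP0]
      have hinit2 : PySem.List.pyGetD r1 0 0 = r1.getD 0 0 := PySem.List.pyGetD_zero r1 0
      rw [hinit1, hinit2]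
      simp only [pvDP]
      apply PySem.List.foldl_congr_mem
      intro s k _
      simp only [PySem.List.pyGetD_natCast]
    rw [hBfold]
    have := pvMD r0 r1 m h1 (m - 1) (by omega)
    rw [show m - 1 + 1 = m by omega] at this
    rw [this, pvQ_self]
    ring_nf
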